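-- pv_equiv track=rewrite | github.com/Saathvik-kadiyal/shift-repo | services/dashboard_service.py | _last_n_month_pairs
-- ===== SOURCE A (Python) =====
-- from typing import List,Any,Optional,Tuple,Set,Dict
--
-- def _last_n_month_pairs(end_year: int, end_month: int, n: int = 12) -> List[Tuple[int, int]]:
--     """Return last up to n (year, month) pairs ending at (end_year, end_month)."""
--     out: List[Tuple[int, int]] = []
--     y, m = end_year, end_month
--     for _ in range(n):
--         out.append((y, m))
--         if m == 1:
--             y, m = y - 1, 12
--         else:
--             m -= 1
--     return sorted(set(out))
-- ===== SOURCE B (Python) =====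
-- from typing import List, Tuple
--
-- def _last_n_month_pairs(end_year: int, end_month: int, n: int = 12) -> List[Tuple[int, int]]:
--     """Return last up to n (year, month) pairs ending at (end_year, end_month).
--
--     Closed form: map each of the n consecutive absolute month indices ending at
--     end_year*12 + end_month - 1 to its (year, month) pair; the indices are
--     already ascending, so no accumulator, no set and no sort are needed."""
--     base = end_year * 12 + end_month - 1
--     return [(idx // 12, idx % 12 + 1) for idx in range(base - n + 1, base + 1)]
-- ===== Notes on version B (the rewrite author's own statement) =====
-- stated objective: simpler
-- what changed: Replaces the backward month-by-month walk plus set() dedup plus sorted() with a two-line closed form that decodes the n consecutive absolute month indices directly into ascending (year, month) pairs, with no accumulator, no set and no sort; Pre_ excludes calls that emit at least one pair from a non-calendar end_month outside 1..12, a corner no caller would specify, where A keeps the raw out-of-range month in its first pairs while B emits the normalized calendar pair.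
-- outside the precondition, e.g. on _last_n_month_pairs(2024, 13, 1): A returns [(2024, 13)], B returns [(2025, 1)]; on _last_n_month_pairs(2024, 0, 2): A returns [(2024, -1), (2024, 0)], B returns [(2023, 11), (2023, 12)]
import Mathlib
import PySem

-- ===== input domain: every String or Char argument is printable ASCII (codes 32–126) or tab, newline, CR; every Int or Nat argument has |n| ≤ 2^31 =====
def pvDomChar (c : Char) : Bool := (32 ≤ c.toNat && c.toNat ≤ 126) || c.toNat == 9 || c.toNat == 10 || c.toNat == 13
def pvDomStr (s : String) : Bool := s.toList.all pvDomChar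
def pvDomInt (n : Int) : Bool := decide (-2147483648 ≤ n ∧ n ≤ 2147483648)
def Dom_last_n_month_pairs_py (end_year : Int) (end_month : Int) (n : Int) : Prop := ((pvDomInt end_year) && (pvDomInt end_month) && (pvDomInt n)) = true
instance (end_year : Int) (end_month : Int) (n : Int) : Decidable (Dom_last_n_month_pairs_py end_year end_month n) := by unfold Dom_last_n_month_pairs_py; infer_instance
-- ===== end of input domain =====

-- B replaces A's backward walk + set() + sorted() by a closed-form decode of the n
-- consecutive absolute month indices, emitted already in ascending order
-- (objective: simpler — no accumulator, no set and no sort).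

-- ===== PORT A =====
-- Literal port of A: walk (y, m) backwards n times appending pairs, then sorted(set(out)).
def last_n_month_pairs_py (end_year : Int) (end_month : Int) (n : Int) : List (Int × Int) :=
  let fin := (PySem.List.pyRange 0 n 1).foldl
    (fun (st : List (Int × Int) × Int × Int) _ =>
      (st.1 ++ [(st.2.1, st.2.2)],
       if st.2.2 = 1 then (st.2.1 - 1, (12 : Int)) else (st.2.1, st.2.2 - 1)))
    ([], end_year, end_month)
  PySem.List.sorted2 (PySem.Set.ofList fin.1) (fun p => p.1) (fun p => p.2) false

-- ===== PORT B =====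
def last_n_month_pairs_py_alt (end_year : Int) (end_month : Int) (n : Int) : List (Int × Int) :=
  let base := end_year * 12 + end_month - 1
  (PySem.List.pyRange (base - n + 1) (base + 1) 1).map
    (fun idx => (PySem.Int.floordiv idx 12, PySem.Int.mod idx 12 + 1))

-- ===== PRECONDITION & SPEC =====
-- Pre_ excludes calls that emit at least one pair (n >= 1) from a non-calendar end_month
-- (outside 1..12): there A keeps the raw out-of-range month in its first pairs while B emits
-- the normalized calendar pair -- a corner no caller would specify, where either reading of a
-- nonsense month is defensible (concrete excluded examples are in claim.json "cites").
def Pre_last_n_month_pairs_py (end_year : Int) (end_month : Int) (n : Int) : Prop :=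
  n ≤ 0 ∨ (1 ≤ end_month ∧ end_month ≤ 12)
instance (end_year : Int) (end_month : Int) (n : Int) : Decidable (Pre_last_n_month_pairs_py end_year end_month n) := by unfold Pre_last_n_month_pairs_py; infer_instance

def pvWitness_last_n_month_pairs_py : Int × Int × Int := (2024, 5, 12)

def Spec_last_n_month_pairs_py (end_year : Int) (end_month : Int) (n : Int) (out : List (Int × Int)) : Prop := out = last_n_month_pairs_py_alt end_year end_month n
instance (end_year : Int) (end_month : Int) (n : Int) (out : List (Int × Int)) : Decidable (Spec_last_n_month_pairs_py end_year end_month n out) := by unfold Spec_last_n_month_pairs_py; infer_instance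

-- ===== CLAIM (what is proved, stated in full; the proofs are below) =====
def Claim_equal_last_n_month_pairs_py : Prop := ∀ (end_year : Int) (end_month : Int) (n : Int), Dom_last_n_month_pairs_py end_year end_month n → Pre_last_n_month_pairs_py end_year end_month n → Spec_last_n_month_pairs_py end_year end_month n (last_n_month_pairs_py end_year end_month n)

-- ===== LEMMAS AND PROOFS =====

-- one backward step of A's walk
def pvStep (s : Int × Int) : Int × Int := if s.2 = 1 then (s.1 - 1, 12) else (s.1, s.2 - 1)

-- B's decode of one absolute month index
def pvDecode (t : Int) : Int × Int := (PySem.Int.floordiv t 12, PySem.Int.mod t 12 + 1)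

-- strict lexicographic order on pairs (Python tuple '<' on distinct int pairs)
def pvLex (a b : Int × Int) : Prop := a.1 < b.1 ∨ (a.1 = b.1 ∧ a.2 < b.2)

def pvBefore (a b : Int × Int) : Bool :=
  decide (a.1 < b.1) || (!decide (b.1 < a.1) && decide (a.2 < b.2))

lemma pvBefore_iff (a b : Int × Int) : pvBefore a b = true ↔ pvLex a b := by
  simp [pvBefore, pvLex]; omega

lemma pvLex_trans {a b c : Int × Int} (h1 : pvLex a b) (h2 : pvLex b c) : pvLex a c := by
  unfold pvLex at *; omega

lemma pvLex_ne {a b : Int × Int} (h : pvLex a b) : a ≠ b := by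
  rintro rfl; unfold pvLex at h; omega

lemma pvLex_total {a b : Int × Int} (h : ¬ pvLex a b) (hne : a ≠ b) : pvLex b a := by
  unfold pvLex at *
  rcases a with ⟨a1, a2⟩; rcases b with ⟨b1, b2⟩
  simp_all [Prod.ext_iff]; omega

lemma pvDecode_step (t : Int) : pvStep (pvDecode t) = pvDecode (t - 1) := by
  have h12 : (0 : Int) < 12 := by norm_num
  have hq : PySem.Int.floordiv t 12 * 12 ≤ t ∧ t < (PySem.Int.floordiv t 12 + 1) * 12 :=
    (PySem.Int.floordiv_eq_iff_of_pos h12).mp rfl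
  have hq2 : PySem.Int.floordiv (t - 1) 12 * 12 ≤ t - 1 ∧
      t - 1 < (PySem.Int.floordiv (t - 1) 12 + 1) * 12 :=
    (PySem.Int.floordiv_eq_iff_of_pos h12).mp rfl
  have hm := PySem.Int.floordiv_mul_add_mod t 12
  have hm2 := PySem.Int.floordiv_mul_add_mod (t - 1) 12
  unfold pvStep pvDecode
  split_ifs with h <;> simp only [Prod.mk.injEq] at * <;> constructor <;> omega

lemma pvDecode_base (y m : Int) (h : 1 ≤ m ∧ m ≤ 12) : pvDecode (y * 12 + m - 1) = (y, m) := by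
  have h12 : (0 : Int) < 12 := by norm_num
  have hfd : PySem.Int.floordiv (y * 12 + m - 1) 12 = y :=
    (PySem.Int.floordiv_eq_iff_of_pos h12).mpr (by constructor <;> omega)
  have hm := PySem.Int.floordiv_mul_add_mod (y * 12 + m - 1) 12
  unfold pvDecode
  simp only [Prod.mk.injEq]
  exact ⟨hfd, by omega⟩

lemma pvDecode_back (y m : Int) (h : 1 ≤ m ∧ m ≤ 12) (i : Nat) :
    pvDecode (y * 12 + m - 1 - (i : Int)) = pvStep^[i] (y, m) := by
  induction i with
  | zero => simpa using pvDecode_base y m h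
  | succ i ih =>
      rw [Function.iterate_succ_apply', ← ih, pvDecode_step]
      congr 1
      push_cast
      ring

-- the fold ignores the loop variable: characterize A's accumulator
lemma pvWalk (l : List Int) :
    ∀ (acc : List (Int × Int)) (s : Int × Int),
      l.foldl
        (fun (st : List (Int × Int) × Int × Int) _ =>
          (st.1 ++ [(st.2.1, st.2.2)],
           if st.2.2 = 1 then (st.2.1 - 1, (12 : Int)) else (st.2.1, st.2.2 - 1)))
        (acc, s)
      = (acc ++ (List.range l.length).map (fun i => pvStep^[i] s), pvStep^[l.length] s) := by
  induction l with
  | nil => intro acc s; simp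
  | cons a l ih =>
      intro acc s
      rw [List.foldl_cons]
      rw [show ((acc, s).1 ++ [((acc, s).2.1, (acc, s).2.2)],
            if (acc, s).2.2 = 1 then ((acc, s).2.1 - 1, (12 : Int)) else ((acc, s).2.1, (acc, s).2.2 - 1))
          = (acc ++ [s], pvStep s) from rfl, ih (acc ++ [s]) (pvStep s)]
      simp only [List.length_cons, Function.iterate_succ_apply, List.range_succ_eq_map,
        List.map_cons, List.map_map, Function.comp_def, Function.iterate_succ_apply]
      simp [List.append_assoc]

lemma pvStep_lex (s : Int × Int) : pvLex (pvStep s) s := by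
  unfold pvStep pvLex
  split_ifs with h <;> simp [h]

lemma pvStepN_lt (s : Int × Int) {a b : Nat} (h : a < b) :
    pvLex (pvStep^[b] s) (pvStep^[a] s) := by
  induction b, h using Nat.le_induction with
  | base => rw [Function.iterate_succ_apply']; exact pvStep_lex _
  | succ b _ ih =>
      rw [Function.iterate_succ_apply']
      exact pvLex_trans (pvStep_lex _) ih

lemma pv_insertBy_perm (x : Int × Int) (ys : List (Int × Int)) :
    (PySem.List.insertBy pvBefore x ys).Perm (x :: ys) := by
  induction ys with
  | nil => exact List.Perm.refl _
  | cons y t ih =>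
      show (if pvBefore x y then x :: y :: t else y :: PySem.List.insertBy pvBefore x t).Perm _
      split_ifs with h
      · exact List.Perm.refl _
      · exact (ih.cons y).trans (List.Perm.swap x y t)

lemma pv_insertBy_pairwise (x : Int × Int) (ys : List (Int × Int))
    (hp : ys.Pairwise pvLex) (hx : x ∉ ys) :
    (PySem.List.insertBy pvBefore x ys).Pairwise pvLex := by
  induction ys with
  | nil => simp [PySem.List.insertBy]
  | cons y t ih =>
      rw [List.pairwise_cons] at hp
      obtain ⟨hy, hpt⟩ := hp
      show (if pvBefore x y then x :: y :: t else y :: PySem.List.insertBy pvBefore x t).Pairwise pvLex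
      split_ifs with hb
      · refine List.Pairwise.cons ?_ (List.Pairwise.cons hy hpt)
        intro z hz
        rcases List.mem_cons.mp hz with rfl | hzt
        · exact (pvBefore_iff x z).mp hb
        · exact pvLex_trans ((pvBefore_iff x y).mp hb) (hy z hzt)
      · have hnxy : ¬ pvLex x y := fun h => by rw [← pvBefore_iff] at h; simp [h] at hb
        have hne : x ≠ y := fun h => hx (by simp [h])
        have hyx : pvLex y x := pvLex_total hnxy hne
        refine List.Pairwise.cons ?_ (ih hpt (fun h => hx (by simp [h])))
        intro z hz
        rcases (PySem.List.mem_insertBy pvBefore x z t).mp hz with rfl | hzt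
        · exact hyx
        · exact hy z hzt

lemma pv_foldl_insertBy (xs : List (Int × Int)) :
    ∀ acc : List (Int × Int), (acc ++ xs).Nodup → acc.Pairwise pvLex →
      (xs.foldl (fun a x => PySem.List.insertBy pvBefore x a) acc).Pairwise pvLex ∧
      (xs.foldl (fun a x => PySem.List.insertBy pvBefore x a) acc).Perm (acc ++ xs) := by
  induction xs with
  | nil =>
      intro acc hnd hp
      simp only [List.foldl_nil, List.append_nil]
      exact ⟨hp, List.Perm.refl _⟩
  | cons x xs ih =>
      intro acc hnd hp
      have hperm0 : (acc ++ x :: xs).Perm (x :: (acc ++ xs)) := List.perm_middle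
      have hnd' : (x :: (acc ++ xs)).Nodup := hperm0.nodup hnd
      have hxacc : x ∉ acc := fun h => (List.nodup_cons.mp hnd').1 (List.mem_append.mpr (Or.inl h))
      have hip : (PySem.List.insertBy pvBefore x acc).Perm (x :: acc) := pv_insertBy_perm x acc
      have hpi : (PySem.List.insertBy pvBefore x acc).Pairwise pvLex :=
        pv_insertBy_pairwise x acc hp hxacc
      have hnd'' : (PySem.List.insertBy pvBefore x acc ++ xs).Nodup := by
        refine ((hip.append_right xs).nodup_iff).mpr ?_
        simpa using hnd'
      obtain ⟨h1, h2⟩ := ih (PySem.List.insertBy pvBefore x acc) hnd'' hpi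
      refine ⟨h1, h2.trans ?_⟩
      refine (hip.append_right xs).trans ?_
      exact (List.perm_middle (a := x) (l₁ := acc) (l₂ := xs)).symm

lemma pvOut_pairwise (s : Int × Int) (K : Nat) :
    ((List.range K).map (fun i => pvStep^[i] s)).Pairwise (fun a b => pvLex b a) := by
  refine List.pairwise_map.mpr ?_
  exact List.pairwise_lt_range.imp (fun h => pvStepN_lt s h)

lemma pvOut_nodup (s : Int × Int) (K : Nat) :
    ((List.range K).map (fun i => pvStep^[i] s)).Nodup := by
  exact (pvOut_pairwise s K).imp (fun h => (pvLex_ne h).symm)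

lemma pvAlt_def (y m n : Int) :
    last_n_month_pairs_py_alt y m n
      = (PySem.List.pyRange (y * 12 + m - 1 - n + 1) (y * 12 + m - 1 + 1) 1).map pvDecode := rfl

lemma pvAlt_eq_reverse (y m n : Int) (h : 1 ≤ m ∧ m ≤ 12) :
    last_n_month_pairs_py_alt y m n
      = ((List.range n.toNat).map (fun i => pvStep^[i] (y, m))).reverse := by
  rw [pvAlt_def, PySem.List.pyRange_one]
  have harg : (y * 12 + m - 1 + 1 - (y * 12 + m - 1 - n + 1)).toNat = n.toNat := by omega
  rw [harg]
  apply List.ext_getElem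
  · simp
  · intro j h1 h2
    have hjlt : j < n.toNat := by simpa using h1
    simp only [List.getElem_map, List.getElem_range, List.getElem_reverse, List.length_map,
      List.length_range]
    rw [← pvDecode_back y m h (n.toNat - 1 - j)]
    congr 1
    omega

-- A's result characterized: the sorted distinct walk list
lemma pvA_eq (y m n : Int) :
    last_n_month_pairs_py y m n
      = ((List.range n.toNat).map (fun i => pvStep^[i] (y, m))).foldl
          (fun a x => PySem.List.insertBy pvBefore x a) [] := by
  unfold last_n_month_pairs_py
  rw [pvWalk (PySem.List.pyRange 0 n 1) [] (y, m)]
  have hlen : (PySem.List.pyRange 0 n 1).length = n.toNat := by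
    rw [PySem.List.length_pyRange_one]; norm_num
  rw [hlen]
  simp only [List.nil_append]
  rw [PySem.Set.ofList_eq_self_of_nodup _ (pvOut_nodup (y, m) n.toNat)]
  rfl

-- ===== VERDICT (by name: the statement is the Claim_ definition above) =====
theorem last_n_month_pairs_py_spec : Claim_equal_last_n_month_pairs_py := by
  unfold Claim_equal_last_n_month_pairs_py
  intro y m n _ hpre
  unfold Spec_last_n_month_pairs_py
  unfold Pre_last_n_month_pairs_py at hpre
  by_cases hn : n ≤ 0
  · rw [pvA_eq]
    have h0 : n.toNat = 0 := by omega
    rw [pvAlt_def, PySem.List.pyRange_one_eq_nil (by omega)]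
    simp [h0]
  · have hm : 1 ≤ m ∧ m ≤ 12 := hpre.resolve_left hn
    rw [pvA_eq, pvAlt_eq_reverse y m n hm]
    set out := (List.range n.toNat).map (fun i => pvStep^[i] (y, m)) with hout
    obtain ⟨hpair, hperm⟩ := pv_foldl_insertBy out []
      (by rw [List.nil_append]; exact pvOut_nodup (y, m) n.toNat) (List.Pairwise.nil)
    rw [List.nil_append] at hperm
    refine List.Perm.eq_of_pairwise ?_ hpair ?_ ?_
    · intro a b _ _ h1 h2
      exact absurd (pvLex_trans h1 h2) (fun h => pvLex_ne h rfl)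
    · exact List.pairwise_reverse.mpr (pvOut_pairwise (y, m) n.toNat)
    · exact hperm.trans out.reverse_perm.symm
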